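-- pv_equiv track=rewrite | github.com/Neil-Do/HUS-Python | Tuan1.py | giaiThuaKep
-- ===== SOURCE A (Python) =====
-- def giaiThuaKep(n):
--     if n < 1: return 0
--     ketQua = 1
--
--     i = 0
--     if n % 2 == 0:
--         i = 2
--     else:
--         i = 1
--
--     while i <= n:
--         ketQua = ketQua * i
--         i = i + 2
--     return ketQua
-- ===== SOURCE B (Python) =====
-- def giaiThuaKep(n):
--     if n < 1:
--         return 0
--     start = 2 if n % 2 == 0 else 1
--     return prodTree(start, n)
--
--
-- def prodTree(lo, hi):
--     # product of the arithmetic sequence lo, lo+2, ..., hi (lo <= hi, same parity),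
--     # computed by a balanced divide-and-conquer product tree
--     if lo == hi:
--         return lo
--     m = (hi - lo) // 2
--     mid = lo + 2 * (m // 2)
--     return prodTree(lo, mid) * prodTree(mid + 2, hi)
-- ===== Notes on version B (the rewrite author's own statement) =====
-- stated objective: alternative
-- what changed: B replaces A's linear accumulator loop by a balanced divide-and-conquer product tree over the factor sequence, recursively splitting the range and multiplying the two halves' products.
import Mathlib
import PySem

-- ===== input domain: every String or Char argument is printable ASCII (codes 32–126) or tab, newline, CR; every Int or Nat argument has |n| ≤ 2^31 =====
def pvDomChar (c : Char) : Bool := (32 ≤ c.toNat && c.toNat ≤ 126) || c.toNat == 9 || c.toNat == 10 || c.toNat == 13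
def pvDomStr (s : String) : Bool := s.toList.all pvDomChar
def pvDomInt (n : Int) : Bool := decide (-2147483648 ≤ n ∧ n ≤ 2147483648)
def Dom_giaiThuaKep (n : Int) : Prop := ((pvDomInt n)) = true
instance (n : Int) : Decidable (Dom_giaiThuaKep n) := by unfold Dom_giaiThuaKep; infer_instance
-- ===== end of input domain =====

-- One-line objective: B replaces A's linear accumulator loop by a balanced divide-and-conquer product tree (alternative algorithm).

-- ===== PORT A =====
-- while i <= n: ketQua *= i; i += 2
def giaiThuaKepLoop (n i ketQua : Int) : Int :=
  if i ≤ n then giaiThuaKepLoop n (i + 2) (ketQua * i) else ketQua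
termination_by (n - i + 2).toNat
decreasing_by simp_wf; omega

def giaiThuaKep (n : Int) : Int :=
  if n < 1 then 0
  else
    let i : Int := if n % 2 == 0 then 2 else 1
    giaiThuaKepLoop n i 1

-- ===== PORT B =====
-- product of lo, lo+2, ..., hi (lo <= hi, same parity) by a balanced product tree
def prodTree (lo hi : Int) : Int :=
  if lo == hi then lo
  else
    let m := PySem.Int.floordiv (hi - lo) 2
    let mid := lo + 2 * PySem.Int.floordiv m 2
    if _h : lo < hi then prodTree lo mid * prodTree (mid + 2) hi else 0
termination_by (hi - lo).toNat
decreasing_by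
  · simp_wf
    omega
  · simp_wf
    omega

def giaiThuaKep_alt (n : Int) : Int :=
  if n < 1 then 0
  else
    let start : Int := if n % 2 == 0 then 2 else 1
    prodTree start n

-- ===== PRECONDITION & SPEC =====
def Spec_giaiThuaKep (n : Int) (out : Int) : Prop := out = giaiThuaKep_alt n
instance (n : Int) (out : Int) : Decidable (Spec_giaiThuaKep n out) := by unfold Spec_giaiThuaKep; infer_instance

-- ===== CLAIM (what is proved, stated in full; the proofs are below) =====
def Claim_equal_giaiThuaKep : Prop := ∀ (n : Int), Dom_giaiThuaKep n → Spec_giaiThuaKep n (giaiThuaKep n)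

-- ===== LEMMAS AND PROOFS =====

theorem loop_stop (n i acc : Int) (h : ¬ i ≤ n) : giaiThuaKepLoop n i acc = acc := by
  rw [giaiThuaKepLoop]; simp [h]

theorem loop_step (n i acc : Int) (h : i ≤ n) :
    giaiThuaKepLoop n i acc = giaiThuaKepLoop n (i + 2) (acc * i) := by
  rw [giaiThuaKepLoop]; simp [h]

-- the accumulator factors out of A's loop
theorem loop_mul (m : Nat) : ∀ (n i : Int), (n - i + 2).toNat = m → ∀ (acc : Int),
    giaiThuaKepLoop n i acc = acc * giaiThuaKepLoop n i 1 := by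
  induction m using Nat.strong_induction_on with
  | _ m ih =>
    intro n i hm acc
    by_cases h : i ≤ n
    · rw [loop_step n i acc h, loop_step n i 1 h, one_mul]
      rw [ih (n - (i + 2) + 2).toNat (by omega) n (i + 2) rfl (acc * i),
          ih (n - (i + 2) + 2).toNat (by omega) n (i + 2) rfl i]
      ring
    · rw [loop_stop n i acc h, loop_stop n i 1 h]; ring

-- consuming the first k+1 factors (i = lo, lo+2, …, lo+2k) of A's loop
theorem loop_split (k : Nat) : ∀ (n lo acc : Int), lo + 2 * (k : Int) ≤ n →
    giaiThuaKepLoop n lo acc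
      = giaiThuaKepLoop n (lo + 2 * (k : Int) + 2) (acc * giaiThuaKepLoop (lo + 2 * (k : Int)) lo 1) := by
  induction k with
  | zero =>
    intro n lo acc h
    simp only [Nat.cast_zero, mul_zero, add_zero]
    rw [loop_step n lo acc (by omega)]
    rw [loop_step lo lo 1 (le_refl lo), loop_stop lo (lo + 2) (1 * lo) (by omega)]
    ring_nf
  | succ k ih =>
    intro n lo acc h
    have hk1 : ((k + 1 : Nat) : Int) = (k : Int) + 1 := by push_cast; ring
    rw [loop_step n lo acc (by omega)]
    have := ih n (lo + 2) (acc * lo) (by omega)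
    rw [this]
    have e1 : lo + 2 + 2 * (k : Int) + 2 = lo + 2 * ((k + 1 : Nat) : Int) + 2 := by
      push_cast; ring
    have e2 : lo + 2 + 2 * (k : Int) = lo + 2 * ((k + 1 : Nat) : Int) := by
      push_cast; ring
    rw [e1, e2]
    congr 1
    have hin : giaiThuaKepLoop (lo + 2 * ((k + 1 : Nat) : Int)) lo 1
        = lo * giaiThuaKepLoop (lo + 2 * ((k + 1 : Nat) : Int)) (lo + 2) 1 := by
      rw [loop_step _ lo 1 (by push_cast; omega), one_mul]
      exact loop_mul _ _ _ rfl lo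
    rw [hin]
    ring

-- B's product tree computes exactly what A's loop computes on the same range
theorem tree_eq_loop (s : Nat) : ∀ (lo hi : Int), (hi - lo).toNat = s → lo ≤ hi →
    (hi - lo) % 2 = 0 → prodTree lo hi = giaiThuaKepLoop hi lo 1 := by
  induction s using Nat.strong_induction_on with
  | _ s ih =>
    intro lo hi hs hle hpar
    by_cases heq : lo = hi
    · subst heq
      rw [prodTree]
      simp only [beq_self_eq_true, if_true]
      rw [loop_step lo lo 1 (le_refl lo), loop_stop lo (lo + 2) (1 * lo) (by omega)]
      ring
    · have hlt : lo < hi := by omega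
      have hd2 : 2 ≤ hi - lo := by omega
      rw [prodTree]
      have hne : (lo == hi) = false := by simp [heq]
      simp only [hne, Bool.false_eq_true, if_false]
      rw [PySem.Int.floordiv_eq_ediv_of_pos (by omega),
          PySem.Int.floordiv_eq_ediv_of_pos (by omega)]
      rw [dif_pos hlt]
      set mid : Int := lo + 2 * ((hi - lo) / 2 / 2) with hmid
      have hmlo : lo ≤ mid := by omega
      have hmhi : mid + 2 ≤ hi := by omega
      have hp1 : (mid - lo) % 2 = 0 := by omega
      have hp2 : (hi - (mid + 2)) % 2 = 0 := by omega
      rw [ih (mid - lo).toNat (by omega) lo mid rfl hmlo hp1,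
          ih (hi - (mid + 2)).toNat (by omega) (mid + 2) hi rfl (by omega) hp2]
      obtain ⟨k, hk⟩ : ∃ k : Nat, mid = lo + 2 * (k : Int) := by
        refine ⟨((mid - lo) / 2).toNat, ?_⟩
        have : ((mid - lo) / 2).toNat = ((mid - lo) / 2 : Int) := Int.toNat_of_nonneg (by omega)
        omega
      have hsplit := loop_split k hi lo 1 (by omega)
      rw [← hk] at hsplit
      rw [hsplit, one_mul]
      rw [loop_mul (hi - (mid + 2) + 2).toNat hi (mid + 2) rfl (giaiThuaKepLoop mid lo 1)]

theorem A_eq_B (n : Int) : giaiThuaKep n = giaiThuaKep_alt n := by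
  rw [giaiThuaKep, giaiThuaKep_alt]
  by_cases h : n < 1
  · simp [h]
  · rw [if_neg h, if_neg h]
    rcases Int.emod_two_eq_zero_or_one n with hp | hp
    · simp only [hp, beq_self_eq_true, if_true]
      exact (tree_eq_loop (n - 2).toNat 2 n rfl (by omega) (by omega)).symm
    · have : (n % 2 == 0) = false := by simp [hp]
      simp only [this, Bool.false_eq_true, if_false]
      exact (tree_eq_loop (n - 1).toNat 1 n rfl (by omega) (by omega)).symm

-- ===== VERDICT (by name: the statement is the Claim_ definition above) =====
theorem giaiThuaKep_spec : Claim_equal_giaiThuaKep := by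
  intro n _
  exact A_eq_B n
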